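-- pv_equiv track=rewrite | github.com/pypeaday/aoc-2021 | src/day5.py | mark_board_with_2d_lines
-- ===== SOURCE A (Python) =====
-- from typing import List, Tuple, Optional
--
-- def mark_board_with_2d_lines(
--     lines: List[List[Tuple[int, int]]], board: List[List[int]]
-- ) -> List[List[int]]:
--     for line in lines:
--         for point in line:
--             rid = point[0]
--             cid = point[1]
--             board[rid][cid] += 1
--
--     return board
-- ===== SOURCE B (Python) =====
-- from typing import List, Tuple
--
--
-- def mark_board_with_2d_lines(
--     lines: List[List[Tuple[int, int]]], board: List[List[int]]
-- ) -> List[List[int]]: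
--     # Pass 1: tally how many times each point is visited.
--     counts = {}
--     for line in lines:
--         for point in line:
--             counts[point] = counts.get(point, 0) + 1
--     # Pass 2: apply each distinct point's total count once.
--     for (rid, cid), count in counts.items():
--         board[rid][cid] += count
--     return board
-- ===== Notes on version B (the rewrite author's own statement) =====
-- stated objective: alternative
-- what changed: B replaces the one-increment-per-visit loop by two differently shaped passes: it first builds a frequency table mapping each distinct point to its multiplicity, then applies each distinct cell's total with a single += per key.
import Mathlib
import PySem

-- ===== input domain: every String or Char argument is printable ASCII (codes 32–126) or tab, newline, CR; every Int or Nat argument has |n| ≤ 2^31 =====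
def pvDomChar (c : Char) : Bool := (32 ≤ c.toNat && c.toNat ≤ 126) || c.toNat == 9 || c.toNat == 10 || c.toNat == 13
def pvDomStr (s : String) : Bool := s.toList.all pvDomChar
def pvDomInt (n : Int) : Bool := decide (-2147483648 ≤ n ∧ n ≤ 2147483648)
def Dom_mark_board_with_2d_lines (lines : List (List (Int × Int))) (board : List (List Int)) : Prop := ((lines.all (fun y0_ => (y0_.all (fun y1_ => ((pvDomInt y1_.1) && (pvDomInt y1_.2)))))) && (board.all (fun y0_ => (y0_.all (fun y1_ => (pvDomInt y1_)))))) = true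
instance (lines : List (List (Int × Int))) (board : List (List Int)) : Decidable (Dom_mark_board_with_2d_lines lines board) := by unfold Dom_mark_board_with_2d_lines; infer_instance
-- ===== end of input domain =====

-- B re-decomposes A's one-increment-per-visit loop into two passes (tally a frequency
-- table, then apply each distinct point's total once); both Pythons mutate `board` in
-- place the same way, and the theorems here are about the returned value.

-- ===== PORT A =====
-- `board[rid][cid] += k` (Python indexing: negative index counts from the end;
-- within Pre_ the indices are in range, where Python never raises)
def pvRowAdd (c k : Int) (row : List Int) : List Int :=
  row.modify (if c < 0 then c + row.length else c).toNat (fun v => v + k)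

def pvAddAt (b : List (List Int)) (p : Int × Int) (k : Int) : List (List Int) :=
  b.modify (if p.1 < 0 then p.1 + b.length else p.1).toNat (pvRowAdd p.2 k)

def mark_board_with_2d_lines (lines : List (List (Int × Int))) (board : List (List Int)) : List (List Int) :=
  lines.foldl (fun b line => line.foldl (fun b point => pvAddAt b point 1) b) board

-- ===== PORT B =====
def mark_board_with_2d_lines_alt (lines : List (List (Int × Int))) (board : List (List Int)) : List (List Int) :=
  let counts : PySem.Dict (Int × Int) Int :=
    lines.foldl (fun d line => line.foldl (fun d point => d.insert point (d.getD point 0 + 1)) d) PySem.Dict.empty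
  counts.items.foldl (fun b e => pvAddAt b e.1 e.2) board

-- ===== PRECONDITION & SPEC =====
-- Pre_: every point's row index is a valid (possibly negative) Python index into the
-- board, and its column index into that row; outside, Python A raises IndexError.
def Pre_mark_board_with_2d_lines (lines : List (List (Int × Int))) (board : List (List Int)) : Prop :=
  ∀ line ∈ lines, ∀ p ∈ line,
    PySem.Raise.InRange board.length p.1 ∧
    PySem.Raise.InRange ((PySem.List.pyGet? board p.1).getD []).length p.2

instance (lines : List (List (Int × Int))) (board : List (List Int)) : Decidable (Pre_mark_board_with_2d_lines lines board) := by unfold Pre_mark_board_with_2d_lines; infer_instance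

def pvWitness_mark_board_with_2d_lines : (List (List (Int × Int))) × List (List Int) :=
  ([[(0, 0), (0, 1)], [(1, 0)]], [[3, 4], [5]])

def Spec_mark_board_with_2d_lines (lines : List (List (Int × Int))) (board : List (List Int)) (out : List (List Int)) : Prop := out = mark_board_with_2d_lines_alt lines board
instance (lines : List (List (Int × Int))) (board : List (List Int)) (out : List (List Int)) : Decidable (Spec_mark_board_with_2d_lines lines board out) := by unfold Spec_mark_board_with_2d_lines; infer_instance

-- ===== CLAIM (what is proved, stated in full; the proofs are below) =====
def Claim_equal_mark_board_with_2d_lines : Prop := ∀ (lines : List (List (Int × Int))) (board : List (List Int)), Dom_mark_board_with_2d_lines lines board → Pre_mark_board_with_2d_lines lines board → Spec_mark_board_with_2d_lines lines board (mark_board_with_2d_lines lines board)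

-- ===== LEMMAS AND PROOFS =====

theorem pv_modify_add_comm (l : List Int) (i j : Nat) (a c : Int) :
    (l.modify i (· + a)).modify j (· + c) = (l.modify j (· + c)).modify i (· + a) := by
  apply List.ext_getElem (by simp)
  intro n h1 h2
  simp only [List.getElem_modify]
  split_ifs <;> ring

theorem pv_modify_add_add (l : List Int) (i : Nat) (a c : Int) :
    (l.modify i (· + a)).modify i (· + c) = l.modify i (· + (a + c)) := by
  apply List.ext_getElem (by simp)
  intro n h1 h2
  simp only [List.getElem_modify]
  split_ifs <;> ring

theorem pv_modify_modify_comm {a : Type} (l : List a) (i j : Nat) (f g : a → a)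
    (h : ∀ x, f (g x) = g (f x)) :
    (l.modify i f).modify j g = (l.modify j g).modify i f := by
  apply List.ext_getElem (by simp)
  intro n h1 h2
  simp only [List.getElem_modify]
  split_ifs with hj hi hi
  · exact (h _).symm
  · rfl
  · rfl
  · rfl

theorem pv_pvRowAdd_comm (c k c' k' : Int) (row : List Int) :
    pvRowAdd c k (pvRowAdd c' k' row) = pvRowAdd c' k' (pvRowAdd c k row) := by
  unfold pvRowAdd
  simp only [List.length_modify]
  exact pv_modify_add_comm _ _ _ _ _

theorem pv_pvRowAdd_add (c a x : Int) (row : List Int) :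
    pvRowAdd c x (pvRowAdd c a row) = pvRowAdd c (a + x) row := by
  unfold pvRowAdd
  simp only [List.length_modify]
  exact pv_modify_add_add _ _ _ _

theorem pv_pvAddAt_comm (b : List (List Int)) (p q : Int × Int) (j k : Int) :
    pvAddAt (pvAddAt b p j) q k = pvAddAt (pvAddAt b q k) p j := by
  unfold pvAddAt
  simp only [List.length_modify]
  exact pv_modify_modify_comm _ _ _ _ _ (fun row => pv_pvRowAdd_comm _ _ _ _ row)

theorem pv_modify_modify_same {a : Type} (l : List a) (i : Nat) (f g : a → a) :
    (l.modify i f).modify i g = l.modify i (fun x => g (f x)) := by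
  apply List.ext_getElem (by simp)
  intro n h1 h2
  simp only [List.getElem_modify]
  split_ifs <;> rfl

theorem pv_pvAddAt_add (b : List (List Int)) (p : Int × Int) (a c : Int) :
    pvAddAt (pvAddAt b p a) p c = pvAddAt b p (a + c) := by
  unfold pvAddAt
  simp only [List.length_modify]
  rw [pv_modify_modify_same]
  congr 1
  funext row
  exact pv_pvRowAdd_add _ _ _ row

theorem pv_foldl_pvAddAt_out (l : List ((Int × Int) × Int)) (b : List (List Int)) (p : Int × Int) (j : Int) :
    l.foldl (fun b e => pvAddAt b e.1 e.2) (pvAddAt b p j)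
      = pvAddAt (l.foldl (fun b e => pvAddAt b e.1 e.2) b) p j := by
  induction l generalizing b with
  | nil => rfl
  | cons e t ih =>
      simp only [List.foldl_cons]
      rw [pv_pvAddAt_comm, ih]

-- the grouped (counter) application of the visits equals the one-by-one application
theorem pv_counter_fold_eq (ps : List (Int × Int)) (b : List (List Int)) :
    ((PySem.Set.ofList ps).map (fun k => (k, (ps.count k : Int)))).foldl
        (fun b e => pvAddAt b e.1 e.2) b
      = ps.foldl (fun b p => pvAddAt b p 1) b := by
  induction ps using List.reverseRecOn with
  | nil => rfl
  | append_singleton ps p ih =>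
      have hset : PySem.Set.ofList (ps ++ [p]) = PySem.Set.add (PySem.Set.ofList ps) p := by
        simp [PySem.Set.ofList_eq_foldl, List.foldl_append]
      rw [hset, List.foldl_append, List.foldl_cons, List.foldl_nil]
      by_cases hp : p ∈ ps
      · have hmem : p ∈ PySem.Set.ofList ps := (PySem.Set.mem_ofList ps p).2 hp
        have hadd : PySem.Set.add (PySem.Set.ofList ps) p = PySem.Set.ofList ps := by
          simp [PySem.Set.add, PySem.Set.contains, hmem]
        obtain ⟨l1, l2, hsplit⟩ := List.append_of_mem hmem
        have hnd : (l1 ++ p :: l2).Nodup := hsplit ▸ PySem.Set.nodup_ofList ps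
        have hpl1 : p ∉ l1 := fun h => (List.disjoint_of_nodup_append hnd) h (by simp)
        have hpl2 : p ∉ l2 := (List.nodup_cons.mp hnd.of_append_right).1
        have hc1 : ∀ k ∈ l1, (k, ((ps ++ [p]).count k : Int)) = (k, (ps.count k : Int)) := by
          intro k hk
          have hkp : ¬ (p = k) := fun h => hpl1 (h ▸ hk)
          simp [List.count_append, hkp]
        have hc2 : ∀ k ∈ l2, (k, ((ps ++ [p]).count k : Int)) = (k, (ps.count k : Int)) := by
          intro k hk
          have hkp : ¬ (p = k) := fun h => hpl2 (h ▸ hk)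
          simp [List.count_append, hkp]
        have hcp : ((ps ++ [p]).count p : Int) = (ps.count p : Int) + 1 := by
          simp [List.count_append]
        rw [hadd, hsplit, List.map_append, List.map_cons,
            List.map_congr_left hc1, List.map_congr_left hc2,
            List.foldl_append, List.foldl_cons, hcp,
            ← pv_pvAddAt_add _ p (ps.count p) 1, pv_foldl_pvAddAt_out]
        congr 1
        have ih2 := ih
        rw [hsplit, List.map_append, List.map_cons, List.foldl_append, List.foldl_cons] at ih2
        exact ih2
      · have hmem : p ∉ PySem.Set.ofList ps := fun h => hp ((PySem.Set.mem_ofList ps p).1 h)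
        have hadd : PySem.Set.add (PySem.Set.ofList ps) p = PySem.Set.ofList ps ++ [p] := by
          simp [PySem.Set.add, PySem.Set.contains, hmem]
        have hc1 : ∀ k ∈ PySem.Set.ofList ps, (k, ((ps ++ [p]).count k : Int)) = (k, (ps.count k : Int)) := by
          intro k hk
          have hkp : ¬ (p = k) := fun h => hp (h ▸ (PySem.Set.mem_ofList ps k).1 hk)
          simp [List.count_append, hkp]
        have hcp : ((ps ++ [p]).count p : Int) = 1 := by
          simp [List.count_append, List.count_eq_zero.2 hp]
        rw [hadd, List.map_append, List.map_cons, List.map_nil,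
            List.map_congr_left hc1, List.foldl_append, List.foldl_cons, List.foldl_nil, hcp, ih]

theorem mark_board_with_2d_lines_eq (lines : List (List (Int × Int))) (board : List (List Int)) :
    mark_board_with_2d_lines lines board = mark_board_with_2d_lines_alt lines board := by
  have hB : mark_board_with_2d_lines_alt lines board
      = ((lines.foldl (fun d line => line.foldl (fun d point => d.insert point (d.getD point 0 + 1)) d)
            PySem.Dict.empty).items).foldl (fun b e => pvAddAt b e.1 e.2) board := rfl
  rw [hB, mark_board_with_2d_lines, ← List.foldl_flatten,
      ← List.foldl_flatten (f := fun d point => PySem.Dict.insert d point (PySem.Dict.getD d point 0 + 1)),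
      PySem.Dict.foldl_insert_getD_add_one_eq_counter, PySem.Dict.items_counter]
  exact (pv_counter_fold_eq lines.flatten board).symm

-- ===== VERDICT (by name: the statement is the Claim_ definition above) =====
theorem mark_board_with_2d_lines_spec : Claim_equal_mark_board_with_2d_lines := by
  intro lines board _ _
  unfold Spec_mark_board_with_2d_lines
  exact mark_board_with_2d_lines_eq lines board
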